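-- pv_equiv track=rewrite | github.com/gmpify/advent-of-code | 2015/11/app.py | validate_has_two_pairs_of_letters
-- ===== SOURCE A (Python) =====
-- def validate_has_two_pairs_of_letters(password):
--     num_of_pairs = 0
--     i_letter = 1
--     while i_letter < len(password):
--         if password[i_letter] == password[i_letter - 1]:
--             num_of_pairs += 1
--             i_letter += 1
--         i_letter += 1
--     return num_of_pairs >= 2
-- ===== SOURCE B (Python) =====
-- def validate_has_two_pairs_of_letters(password):
--     # run-length scan: a maximal run of length L contributes L // 2 pairs
--     total = 0
--     run = 0
--     prev = None
--     for ch in password: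
--         if run and ch == prev:
--             run += 1
--         else:
--             total += run // 2
--             run = 1
--             prev = ch
--     total += run // 2
--     return total >= 2
-- ===== Notes on version B (the rewrite author's own statement) =====
-- stated objective: alternative
-- what changed: Replaces A's index-skipping while loop (jumping by 2 after a matched pair) with a single run-length scan over the characters that accumulates run_length // 2 per maximal run of equal characters.
import Mathlib
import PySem

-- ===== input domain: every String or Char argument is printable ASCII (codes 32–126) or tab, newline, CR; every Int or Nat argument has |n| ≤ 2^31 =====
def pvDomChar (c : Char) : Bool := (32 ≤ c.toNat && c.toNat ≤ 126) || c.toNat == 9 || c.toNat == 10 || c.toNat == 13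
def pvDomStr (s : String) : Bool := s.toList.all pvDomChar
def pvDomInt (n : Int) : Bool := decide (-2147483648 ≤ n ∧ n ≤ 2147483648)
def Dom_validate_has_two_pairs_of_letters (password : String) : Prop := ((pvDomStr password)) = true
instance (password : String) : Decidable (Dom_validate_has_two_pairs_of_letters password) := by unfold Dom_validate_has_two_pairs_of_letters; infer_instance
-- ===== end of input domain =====

-- B replaces A's index-skipping while loop with a run-length scan summing run_length / 2 per maximal run (alternative decomposition, same cost).


-- ===== PORT A =====
-- A's while loop: compare password[i] with password[i-1]; on a match count a pair
-- and skip one extra position. Transcribed as structural recursion on the char list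
-- (the pair (c1, c2) is (password[i-1], password[i])), with the num_of_pairs accumulator.
def pvALoop : List Char → Nat → Nat
  | c1 :: c2 :: rest, num =>
      if c1 == c2 then pvALoop rest (num + 1) else pvALoop (c2 :: rest) num
  | _, num => num

def validate_has_two_pairs_of_letters (password : String) : Bool :=
  decide (2 ≤ pvALoop password.toList 0)

-- ===== PORT B =====
-- B's run-length scan: state (prev char, current run length), flushing run / 2 on each run break.
def pvBGo (c : Char) (n : Nat) : List Char → Nat
  | [] => n / 2
  | d :: rest => if d == c then pvBGo c (n + 1) rest else n / 2 + pvBGo d 1 rest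

def pvBCount : List Char → Nat
  | [] => 0
  | c :: rest => pvBGo c 1 rest

def validate_has_two_pairs_of_letters_alt (password : String) : Bool :=
  decide (2 ≤ pvBCount password.toList)

-- ===== PRECONDITION & SPEC =====
def Spec_validate_has_two_pairs_of_letters (password : String) (out : Bool) : Prop := out = validate_has_two_pairs_of_letters_alt password
instance (password : String) (out : Bool) : Decidable (Spec_validate_has_two_pairs_of_letters password out) := by unfold Spec_validate_has_two_pairs_of_letters; infer_instance

-- ===== CLAIM (what is proved, stated in full; the proofs are below) =====
def Claim_equal_validate_has_two_pairs_of_letters : Prop := ∀ (password : String), Dom_validate_has_two_pairs_of_letters password → Spec_validate_has_two_pairs_of_letters password (validate_has_two_pairs_of_letters password)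

-- ===== LEMMAS AND PROOFS =====

theorem pvALoop_replicate (n : Nat) : ∀ (c : Char) (num : Nat),
    pvALoop (List.replicate n c) num = num + n / 2 := by
  induction n using Nat.twoStepInduction with
  | zero => intro c num; simp [pvALoop]
  | one => intro c num; simp [pvALoop]
  | more n ih _ =>
    intro c num
    simp only [List.replicate, pvALoop, BEq.rfl, if_true]
    rw [ih c (num + 1)]
    omega

theorem pvALoop_replicate_append (n : Nat) : ∀ (c d : Char) (rest : List Char) (num : Nat),
    (c == d) = false →
    pvALoop (List.replicate n c ++ d :: rest) num = pvALoop (d :: rest) (num + n / 2) := by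
  induction n using Nat.twoStepInduction with
  | zero => intro c d rest num _; simp
  | one => intro c d rest num h; simp [pvALoop, h]
  | more n ih _ =>
    intro c d rest num h
    simp only [List.replicate, List.cons_append, pvALoop, BEq.rfl, if_true]
    rw [ih c d rest (num + 1) h]
    have : num + 1 + n / 2 = num + (n + 1 + 1) / 2 := by omega
    rw [this]

theorem pvALoop_eq_bGo (rest : List Char) : ∀ (c : Char) (n num : Nat),
    pvALoop (List.replicate n c ++ rest) num = num + pvBGo c n rest := by
  induction rest with
  | nil => intro c n num; simp [pvBGo, pvALoop_replicate]
  | cons d rest ih =>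
    intro c n num
    by_cases h : (d == c) = true
    · have hd : d = c := by simpa using h
      subst hd
      have : List.replicate n d ++ d :: rest = List.replicate (n + 1) d ++ rest := by
        rw [List.replicate_succ']; simp
      rw [this, ih d (n + 1) num]
      simp [pvBGo]
    · have h' : (c == d) = false := by
        simp only [beq_eq_false_iff_ne]
        intro he; exact h (by simp [he])
      rw [pvALoop_replicate_append n c d rest num h']
      have : d :: rest = List.replicate 1 d ++ rest := by simp
      rw [this, ih d 1 (num + n / 2)]
      simp [pvBGo, h, Nat.add_assoc]

theorem pvALoop_eq_bCount (l : List Char) : pvALoop l 0 = pvBCount l := by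
  cases l with
  | nil => simp [pvALoop, pvBCount]
  | cons c rest =>
    have : c :: rest = List.replicate 1 c ++ rest := by simp
    rw [pvBCount, this, pvALoop_eq_bGo rest c 1 0]
    simp

-- ===== VERDICT (by name: the statement is the Claim_ definition above) =====
theorem validate_has_two_pairs_of_letters_spec : Claim_equal_validate_has_two_pairs_of_letters := by
  intro password _
  unfold Spec_validate_has_two_pairs_of_letters validate_has_two_pairs_of_letters validate_has_two_pairs_of_letters_alt
  rw [pvALoop_eq_bCount]
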